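-- pv_equiv track=rewrite | github.com/ruchirK/python-differential | differential-collection.py | collection_count
-- ===== SOURCE A (Python) =====
-- from collections import defaultdict
--
-- def collection_consolidate(a):
--     consolidated = defaultdict(int)
--     for (data, diff) in a:
--         consolidated[data] += diff
--     return [(data, diff) for (data, diff) in consolidated.items() if diff != 0]
--
-- def collection_reduce(a, f):
--     keys = defaultdict(list)
--     out = []
--     for ((key, val), diff) in a:
--         keys[key].append((val, diff))
--     for (key, vals) in keys.items():
--         results = f(vals)
--         for (val, diff) in results:
--             out.append(((key, val), diff))
--     return collection_consolidate(out)
--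
-- def collection_count(a):
--     def count(vals):
--         out = 0
--         for (_, diff) in vals:
--             out += diff
--
--         if out != 0:
--             return [(out, 1)]
--         else:
--             return []
--
--     return collection_reduce(a, count)
-- ===== SOURCE B (Python) =====
-- from collections import defaultdict
--
-- def collection_count(a):
--     counts = defaultdict(int)
--     for ((key, _), diff) in a:
--         counts[key] += diff
--     return [((key, total), 1) for (key, total) in counts.items() if total != 0]
-- ===== Notes on version B (the rewrite author's own statement) =====
-- stated objective: simpler
-- what changed: Replaces the two-stage group-into-lists / reduce / re-consolidate pipeline with a single pass that keeps one scalar running sum per key and emits ((key,total),1) for the nonzero totals.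
import Mathlib
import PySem

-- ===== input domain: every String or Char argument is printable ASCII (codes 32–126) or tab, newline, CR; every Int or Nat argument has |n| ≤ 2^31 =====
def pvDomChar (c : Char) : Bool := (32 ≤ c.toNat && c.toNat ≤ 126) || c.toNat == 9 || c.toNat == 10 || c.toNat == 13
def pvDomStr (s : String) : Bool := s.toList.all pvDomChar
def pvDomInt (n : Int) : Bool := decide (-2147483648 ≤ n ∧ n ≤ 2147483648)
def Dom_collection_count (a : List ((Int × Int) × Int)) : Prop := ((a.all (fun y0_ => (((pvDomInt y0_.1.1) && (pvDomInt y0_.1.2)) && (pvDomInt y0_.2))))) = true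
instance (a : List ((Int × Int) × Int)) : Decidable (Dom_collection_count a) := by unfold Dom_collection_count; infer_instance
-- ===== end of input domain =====

-- B replaces A's group-into-lists / reduce / re-consolidate pipeline with a single
-- scalar-sum-per-key pass (objective: simpler).

-- ===== PORT A =====
-- collection_consolidate's 'consolidated' dict loop
def pvConsolidatedDict (a : List ((Int × Int) × Int)) : PySem.Dict (Int × Int) Int :=
  a.foldl (fun d p => d.modify p.1 0 (· + p.2)) PySem.Dict.empty

-- collection_consolidate
def pvConsolidate (a : List ((Int × Int) × Int)) : List ((Int × Int) × Int) :=
  (pvConsolidatedDict a).items.filter (fun p => p.2 != 0)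

-- the 'out' accumulation loop of the inner 'count' helper
def pvCountSum (vals : List (Int × Int)) : Int :=
  vals.foldl (fun out p => out + p.2) 0

-- the inner 'count' helper of collection_count
def pvCount (vals : List (Int × Int)) : List (Int × Int) :=
  if pvCountSum vals != 0 then [(pvCountSum vals, 1)] else []

-- collection_reduce's 'keys' grouping dict
def pvKeysDict (a : List ((Int × Int) × Int)) : PySem.Dict Int (List (Int × Int)) :=
  a.foldl (fun d p => d.modify p.1.1 [] (· ++ [(p.1.2, p.2)])) PySem.Dict.empty

-- collection_reduce
def pvReduce (a : List ((Int × Int) × Int)) (f : List (Int × Int) → List (Int × Int)) :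
    List ((Int × Int) × Int) :=
  pvConsolidate ((pvKeysDict a).items.foldl
    (fun out kv => (f kv.2).foldl (fun out vd => out ++ [((kv.1, vd.1), vd.2)]) out) [])

def collection_count (a : List ((Int × Int) × Int)) : List ((Int × Int) × Int) :=
  pvReduce a pvCount

-- ===== PORT B =====
-- B's single counts dict
def pvCountsDict (a : List ((Int × Int) × Int)) : PySem.Dict Int Int :=
  a.foldl (fun d p => d.modify p.1.1 0 (· + p.2)) PySem.Dict.empty

def collection_count_alt (a : List ((Int × Int) × Int)) : List ((Int × Int) × Int) :=
  ((pvCountsDict a).items.filter (fun p => p.2 != 0)).map (fun p => ((p.1, p.2), (1 : Int)))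

-- ===== PRECONDITION & SPEC =====
def Spec_collection_count (a : List ((Int × Int) × Int)) (out : List ((Int × Int) × Int)) : Prop := out = collection_count_alt a
instance (a : List ((Int × Int) × Int)) (out : List ((Int × Int) × Int)) : Decidable (Spec_collection_count a out) := by unfold Spec_collection_count; infer_instance

-- ===== CLAIM (what is proved, stated in full; the proofs are below) =====
def Claim_equal_collection_count : Prop := ∀ (a : List ((Int × Int) × Int)), Dom_collection_count a → Spec_collection_count a (collection_count a)

-- ===== LEMMAS AND PROOFS =====

-- the per-key running sum both programs compute
def pvS (a : List ((Int × Int) × Int)) (k : Int) : Int :=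
  ((a.filter (fun p => p.1.1 == k)).map (·.2)).sum

-- a modify-accumulate loop sums the matching weights (generic key/weight projections)
theorem pv_getD_foldl_modify_add {α κ : Type} [BEq κ] [LawfulBEq κ]
    (key : α → κ) (w : α → Int) (l : List α) (d : PySem.Dict κ Int) (k : κ) :
    (l.foldl (fun d p => d.modify (key p) 0 (· + w p)) d).getD k 0
      = d.getD k 0 + ((l.filter (fun p => key p == k)).map w).sum := by
  induction l generalizing d with
  | nil => simp
  | cons p l ih =>
    simp only [List.foldl_cons, ih, List.filter_cons]
    by_cases h : key p = k
    · subst h; simp [PySem.Dict.getD_modify_self]; ring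
    · rw [PySem.Dict.getD_modify_of_ne d 0 _ (Ne.symm h)]
      simp [h]

-- a consolidate loop over pairwise-distinct fresh keys appends the list unchanged
theorem pv_consolidate_fresh (l : List ((Int × Int) × Int)) (d : PySem.Dict (Int × Int) Int)
    (hnd : (l.map Prod.fst).Nodup) (hfresh : ∀ p ∈ l, d.contains p.1 = false) :
    (l.foldl (fun d p => d.modify p.1 0 (· + p.2)) d).items = d.items ++ l := by
  induction l generalizing d with
  | nil => simp
  | cons p l ih =>
    simp only [List.map_cons, List.nodup_cons] at hnd
    have hc : d.contains p.1 = false := hfresh p (by simp)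
    have hmod : d.modify p.1 0 (· + p.2) = d.insert p.1 (d.getD p.1 0 + p.2) := rfl
    have hg : d.getD p.1 0 = 0 := PySem.Dict.getD_of_not_contains d 0 hc
    simp only [List.foldl_cons, hmod, hg, zero_add]
    rw [ih _ hnd.2 ?_, PySem.Dict.items_insert_of_not_contains d p.2 hc, List.append_assoc]
    · rfl
    · intro q hq
      rw [PySem.Dict.contains_insert]
      have hne : q.1 ≠ p.1 := by
        intro he; exact hnd.1 (by simpa [he] using List.mem_map_of_mem (f := Prod.fst) hq)
      simp [hne, hfresh q (List.mem_cons_of_mem _ hq)]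

theorem pv_flatMap_if {α β : Type} (P : α → Bool) (h : α → β) (L : List α) :
    (L.flatMap (fun k => if P k then [h k] else [])) = (L.filter P).map h := by
  induction L with
  | nil => rfl
  | cons x L ih => by_cases hx : P x <;> simp [hx, ih]

-- B's dict's items, in first-seen key order
theorem pv_counts_items (a : List ((Int × Int) × Int)) :
    (pvCountsDict a).items
      = (PySem.Set.ofList (a.map (·.1.1))).map (fun k => (k, pvS a k)) := by
  have hkeys : (pvCountsDict a).keys = PySem.Set.ofList (a.map (·.1.1)) := by
    simpa using PySem.Dict.keys_foldl_modify_key a (fun p => p.1.1) 0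
      (fun d p => (· + p.2)) PySem.Dict.empty
  have hnd : (pvCountsDict a).keys.Nodup :=
    PySem.Dict.nodup_keys_foldl_modify_key a (fun p => p.1.1) 0 _ _ PySem.Dict.nodup_keys_empty
  rw [PySem.Dict.items_eq_map_keys _ hnd 0, hkeys]
  refine List.map_congr_left (fun k _ => ?_)
  have := pv_getD_foldl_modify_add (fun p : (Int × Int) × Int => p.1.1) (fun p => p.2)
    a PySem.Dict.empty k
  simp only [pvCountsDict, this]
  simp [pvS]

-- A's grouping dict's items, same key order, per-key (val, diff) lists
theorem pv_keysD_items (a : List ((Int × Int) × Int)) :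
    (pvKeysDict a).items
      = (PySem.Set.ofList (a.map (·.1.1))).map
          (fun k => (k, (a.filter (fun p => p.1.1 == k)).map (fun p => (p.1.2, p.2)))) := by
  have hform : pvKeysDict a
      = (a.map (fun p => (p.1.1, (p.1.2, p.2)))).foldl
          (fun d q => d.modify q.1 [] (· ++ [q.2])) PySem.Dict.empty := by
    rw [List.foldl_map]; rfl
  have hkeys : (pvKeysDict a).keys = PySem.Set.ofList (a.map (·.1.1)) := by
    simpa using PySem.Dict.keys_foldl_modify_key a (fun p => p.1.1) []
      (fun d p => (· ++ [(p.1.2, p.2)])) PySem.Dict.empty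
  have hnd : (pvKeysDict a).keys.Nodup :=
    PySem.Dict.nodup_keys_foldl_modify_key a (fun p => p.1.1) []
      (fun d p => (· ++ [(p.1.2, p.2)])) PySem.Dict.empty PySem.Dict.nodup_keys_empty
  rw [PySem.Dict.items_eq_map_keys _ hnd [], hkeys]
  refine List.map_congr_left (fun k _ => ?_)
  rw [hform, PySem.Dict.getD_foldl_modify_append, List.filter_map, List.map_map]
  simp [Function.comp_def]

-- ===== VERDICT (by name: the statement is the Claim_ definition above) =====
theorem collection_count_spec : Claim_equal_collection_count := by
  intro a _
  show collection_count a = collection_count_alt a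
  set K : List Int := PySem.Set.ofList (a.map (·.1.1)) with hK
  have hKnd : K.Nodup := PySem.Set.nodup_ofList _
  set L : List Int := K.filter (fun k => pvS a k != 0) with hL
  -- B's value
  have hB : collection_count_alt a = L.map (fun k => ((k, pvS a k), (1 : Int))) := by
    unfold collection_count_alt
    rw [pv_counts_items, List.filter_map, List.map_map]
    rfl
  -- A's intermediate 'out'
  have hout : (pvKeysDict a).items.foldl
      (fun out kv => (pvCount kv.2).foldl (fun out vd => out ++ [((kv.1, vd.1), vd.2)]) out) []
      = L.map (fun k => ((k, pvS a k), (1 : Int))) := by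
    have hbody : ∀ (init : List ((Int × Int) × Int)) (kv : Int × List (Int × Int)),
        (pvCount kv.2).foldl (fun out vd => out ++ [((kv.1, vd.1), vd.2)]) init
          = init ++ (pvCount kv.2).map (fun vd => ((kv.1, vd.1), vd.2)) :=
      fun init kv => PySem.List.foldl_append_singleton_eq_map _ _ _
    rw [PySem.List.foldl_congr_mem (pvKeysDict a).items _
      (fun out kv => out ++ (pvCount kv.2).map (fun vd => ((kv.1, vd.1), vd.2))) []
      (fun acc kv _ => hbody acc kv)]
    rw [PySem.List.foldl_append_eq_flatMap
      (fun kv : Int × List (Int × Int) => (pvCount kv.2).map (fun vd => ((kv.1, vd.1), vd.2))) _ []]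
    rw [List.nil_append, pv_keysD_items, List.flatMap_map]
    have hcv : ∀ k : Int,
        pvCount ((a.filter (fun p => p.1.1 == k)).map (fun p => (p.1.2, p.2)))
          = if pvS a k != 0 then [(pvS a k, 1)] else [] := by
      intro k
      have hsum : pvCountSum ((a.filter (fun p => p.1.1 == k)).map (fun p => (p.1.2, p.2)))
          = pvS a k := by
        unfold pvCountSum
        rw [PySem.List.foldl_add (g := fun p : Int × Int => p.2)]
        simp [pvS, List.map_map, Function.comp_def]
      unfold pvCount
      rw [hsum]
    have hfun : (fun k => ((pvCount ((a.filter (fun p => p.1.1 == k)).map (fun p => (p.1.2, p.2)))).map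
          (fun vd => ((k, vd.1), vd.2))))
        = fun k => if pvS a k != 0 then [((k, pvS a k), (1 : Int))] else [] := by
      funext k; rw [hcv k]; by_cases h : pvS a k != 0 <;> simp [h]
    rw [hfun, pv_flatMap_if (fun k => pvS a k != 0) (fun k => ((k, pvS a k), (1 : Int))) K]
  -- consolidation of 'out' is the identity, and the final filter keeps everything
  have hnodup : ((L.map (fun k => ((k, pvS a k), (1 : Int)))).map Prod.fst).Nodup := by
    rw [List.map_map]
    exact (hKnd.filter _).map
      (fun x y h => by simpa using congrArg (fun q : (Int × Int) => q.1) h)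
  unfold collection_count pvReduce pvConsolidate pvConsolidatedDict
  rw [hout, hB]
  rw [pv_consolidate_fresh _ PySem.Dict.empty hnodup
    (fun p _ => PySem.Dict.contains_empty p.1)]
  rw [show (PySem.Dict.empty : PySem.Dict (Int × Int) Int).items = [] from rfl, List.nil_append]
  simp [List.filter_map, Function.comp_def]
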